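-- pv_equiv track=rewrite | github.com/phanngoc/agent-trading | show_debate.py | split_speakers
-- ===== SOURCE A (Python) =====
-- def split_speakers(history: str) -> list[dict]:
--     """Split combined debate history into per-turn entries."""
--     turns = []
--     current_speaker = None
--     current_lines = []
--
--     for line in history.strip().split("\n"):
--         # Detect speaker changes
--         if line.startswith("Bull Analyst:"):
--             if current_speaker:
--                 turns.append({"speaker": current_speaker, "text": "\n".join(current_lines).strip()})
--             current_speaker = "Bull Analyst"
--             current_lines = [line[len("Bull Analyst:"):].strip()]
--         elif line.startswith("Bear Analyst:"):
--             if current_speaker: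
--                 turns.append({"speaker": current_speaker, "text": "\n".join(current_lines).strip()})
--             current_speaker = "Bear Analyst"
--             current_lines = [line[len("Bear Analyst:"):].strip()]
--         else:
--             current_lines.append(line)
--
--     if current_speaker and current_lines:
--         turns.append({"speaker": current_speaker, "text": "\n".join(current_lines).strip()})
--
--     return turns
-- ===== SOURCE B (Python) =====
-- def _marker(line):
--     """Return (prefix, speaker) if line starts a new turn, else None."""
--     for prefix, name in (("Bull Analyst:", "Bull Analyst"), ("Bear Analyst:", "Bear Analyst")):
--         if line.startswith(prefix):
--             return prefix, name
--     return None
--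
--
-- def _parse(lines):
--     """lines[0] is a marker line; emit its turn, then recurse on the next marker."""
--     prefix, name = _marker(lines[0])
--     body = [lines[0][len(prefix):].strip()]
--     i = 1
--     while i < len(lines) and _marker(lines[i]) is None:
--         body.append(lines[i])
--         i += 1
--     entry = {"speaker": name, "text": "\n".join(body).strip()}
--     return [entry] + (_parse(lines[i:]) if i < len(lines) else [])
--
--
-- def split_speakers(history: str) -> list:
--     """Split combined debate history into per-turn entries."""
--     lines = history.strip().split("\n")
--     i = 0
--     while i < len(lines) and _marker(lines[i]) is None:
--         i += 1
--     return _parse(lines[i:]) if i < len(lines) else []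
-- ===== Notes on version B (the rewrite author's own statement) =====
-- stated objective: alternative
-- what changed: A threads a (current_speaker, current_lines, turns) accumulator through one stateful loop with an end-of-loop flush; B drops the pre-marker prelude, then recursively emits one turn at a time by scanning the body up to the next marker line (takeWhile/dropWhile decomposition), with no mutable speaker state or final flush.
import Mathlib
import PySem

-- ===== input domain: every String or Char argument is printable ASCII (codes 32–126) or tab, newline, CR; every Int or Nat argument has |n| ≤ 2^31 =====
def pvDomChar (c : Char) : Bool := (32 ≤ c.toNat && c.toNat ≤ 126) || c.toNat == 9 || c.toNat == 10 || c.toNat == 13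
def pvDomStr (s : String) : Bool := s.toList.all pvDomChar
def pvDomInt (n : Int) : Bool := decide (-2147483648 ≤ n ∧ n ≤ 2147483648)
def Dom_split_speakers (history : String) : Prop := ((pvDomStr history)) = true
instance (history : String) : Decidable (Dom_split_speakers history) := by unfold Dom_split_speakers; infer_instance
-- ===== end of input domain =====

-- B re-decomposes A's single accumulator loop as "skip prelude, then recursively parse one turn at a time"; objective: alternative (same cost, different structure).


-- ===== PORT A =====
-- the repeated dict-building expression {"speaker": …, "text": "\n".join(…).strip()}
def entryA (sp : String) (cur : List String) : List (String × String) :=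
  [("speaker", sp), ("text", PySem.Str.strip (PySem.Str.join "\n" cur))]

-- the for-loop of A, state (current_speaker, current_lines, turns); [] case = the final flush
def loopA : Option String → List String → List (List (String × String)) → List String → List (List (String × String))
  | sp, cur, turns, [] =>
    match sp with
    | some s => if cur = [] then turns else turns ++ [entryA s cur]
    | none => turns
  | sp, cur, turns, line :: rest =>
    if PySem.Str.startswith line "Bull Analyst:" then
      loopA (some "Bull Analyst")
        [PySem.Str.strip (PySem.Str.slice line (some 13) none)]
        (match sp with | some s => turns ++ [entryA s cur] | none => turns) rest
    else if PySem.Str.startswith line "Bear Analyst:" then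
      loopA (some "Bear Analyst")
        [PySem.Str.strip (PySem.Str.slice line (some 13) none)]
        (match sp with | some s => turns ++ [entryA s cur] | none => turns) rest
    else
      loopA sp (cur ++ [line]) turns rest

def split_speakers (history : String) : List (List (String × String)) :=
  loopA none [] [] ((PySem.Str.split? (PySem.Str.strip history) "\n").getD [])

-- ===== PORT B =====
-- _marker: (prefix, speaker) if the line starts a turn
def markerB (line : String) : Option (String × String) :=
  if PySem.Str.startswith line "Bull Analyst:" then some ("Bull Analyst:", "Bull Analyst")
  else if PySem.Str.startswith line "Bear Analyst:" then some ("Bear Analyst:", "Bear Analyst")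
  else none

def entryB (sp : String) (body : List String) : List (String × String) :=
  [("speaker", sp), ("text", PySem.Str.strip (PySem.Str.join "\n" body))]

def noMarkerB (line : String) : Bool := (markerB line).isNone

-- _parse: head is a marker line; the while loop gathering the body = takeWhile/dropWhile
def parseB (lines : List String) : List (List (String × String)) :=
  match lines with
  | [] => []            -- never reached: _parse is only called on a list starting with a marker line
  | line0 :: rest =>
    match markerB line0 with
    | none => []        -- never reached
    | some (pre, name) =>
      let body := PySem.Str.strip (PySem.Str.slice line0 (some (PySem.Str.len pre)) none)
        :: rest.takeWhile noMarkerB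
      entryB name body ::
        (if rest.dropWhile noMarkerB = [] then []
         else parseB (rest.dropWhile noMarkerB))
termination_by lines.length
decreasing_by
  have := List.length_dropWhile_le noMarkerB rest
  simp only [List.length_cons]
  omega

def split_speakers_alt (history : String) : List (List (String × String)) :=
  let lines := (PySem.Str.split? (PySem.Str.strip history) "\n").getD []
  let rest := lines.dropWhile noMarkerB
  if rest = [] then [] else parseB rest

-- ===== PRECONDITION & SPEC =====
def Spec_split_speakers (history : String) (out : List (List (String × String))) : Prop := out = split_speakers_alt history
instance (history : String) (out : List (List (String × String))) : Decidable (Spec_split_speakers history out) := by unfold Spec_split_speakers; infer_instance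

-- ===== CLAIM (what is proved, stated in full; the proofs are below) =====
def Claim_equal_split_speakers : Prop := ∀ (history : String), Dom_split_speakers history → Spec_split_speakers history (split_speakers history)

-- ===== LEMMAS AND PROOFS =====
def contB (r : List String) : List (List (String × String)) :=
  if r = [] then [] else parseB r

theorem len13 : PySem.Str.len "Bull Analyst:" = 13 ∧ PySem.Str.len "Bear Analyst:" = 13 := by
  constructor <;> decide

theorem contB_cons (line : String) (rest : List String) :
    contB (line :: rest) = parseB (line :: rest) := by
  simp [contB]

theorem parseB_cons (line : String) (rest : List String) (pre name : String)
    (hm : markerB line = some (pre, name)) :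
    parseB (line :: rest)
      = entryB name (PySem.Str.strip (PySem.Str.slice line (some (PySem.Str.len pre)) none)
          :: rest.takeWhile noMarkerB) :: contB (rest.dropWhile noMarkerB) := by
  rw [parseB, hm, contB]

theorem markerB_bull (line : String) (h : PySem.Str.startswith line "Bull Analyst:" = true) :
    markerB line = some ("Bull Analyst:", "Bull Analyst") := by
  unfold markerB; rw [if_pos h]

theorem markerB_bear (line : String) (h1 : ¬ PySem.Str.startswith line "Bull Analyst:" = true)
    (h2 : PySem.Str.startswith line "Bear Analyst:" = true) :
    markerB line = some ("Bear Analyst:", "Bear Analyst") := by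
  unfold markerB; rw [if_neg h1, if_pos h2]

theorem markerB_none (line : String) (h1 : ¬ PySem.Str.startswith line "Bull Analyst:" = true)
    (h2 : ¬ PySem.Str.startswith line "Bear Analyst:" = true) :
    markerB line = none := by
  unfold markerB; rw [if_neg h1, if_neg h2]

theorem loopA_some (rest : List String) : ∀ (s : String) (cur : List String)
    (turns : List (List (String × String))), cur ≠ [] →
    loopA (some s) cur turns rest
      = turns ++ entryA s (cur ++ rest.takeWhile noMarkerB) :: contB (rest.dropWhile noMarkerB) := by
  induction rest with
  | nil => intro s cur turns hc; simp [loopA, contB, hc]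
  | cons line rest ih =>
    intro s cur turns hc
    by_cases hbull : PySem.Str.startswith line "Bull Analyst:" = true
    · have hm := markerB_bull line hbull
      have hnm : noMarkerB line = false := by simp [noMarkerB, hm]
      rw [loopA, if_pos hbull, ih _ _ _ (by simp),
        List.takeWhile_cons, List.dropWhile_cons, hnm]
      simp only [Bool.false_eq_true, if_false]
      rw [contB_cons, parseB_cons _ _ _ _ hm, len13.1]
      simp [entryA, entryB]
    · by_cases hbear : PySem.Str.startswith line "Bear Analyst:" = true
      · have hm := markerB_bear line hbull hbear
        have hnm : noMarkerB line = false := by simp [noMarkerB, hm]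
        rw [loopA, if_neg hbull, if_pos hbear, ih _ _ _ (by simp),
          List.takeWhile_cons, List.dropWhile_cons, hnm]
        simp only [Bool.false_eq_true, if_false]
        rw [contB_cons, parseB_cons _ _ _ _ hm, len13.2]
        simp [entryA, entryB]
      · have hnm : noMarkerB line = true := by simp [noMarkerB, markerB_none line hbull hbear]
        rw [loopA, if_neg hbull, if_neg hbear, ih _ _ _ (by simp),
          List.takeWhile_cons, List.dropWhile_cons, hnm]
        simp

theorem loopA_none (lines : List String) : ∀ (cur : List String),
    loopA none cur [] lines = contB (lines.dropWhile noMarkerB) := by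
  induction lines with
  | nil => intro cur; simp [loopA, contB]
  | cons line rest ih =>
    intro cur
    by_cases hbull : PySem.Str.startswith line "Bull Analyst:" = true
    · have hm := markerB_bull line hbull
      have hnm : noMarkerB line = false := by simp [noMarkerB, hm]
      rw [loopA, if_pos hbull, loopA_some _ _ _ _ (by simp), List.dropWhile_cons, hnm]
      simp only [Bool.false_eq_true, if_false]
      rw [contB_cons, parseB_cons _ _ _ _ hm, len13.1]
      simp [entryA, entryB]
    · by_cases hbear : PySem.Str.startswith line "Bear Analyst:" = true
      · have hm := markerB_bear line hbull hbear
        have hnm : noMarkerB line = false := by simp [noMarkerB, hm]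
        rw [loopA, if_neg hbull, if_pos hbear, loopA_some _ _ _ _ (by simp),
          List.dropWhile_cons, hnm]
        simp only [Bool.false_eq_true, if_false]
        rw [contB_cons, parseB_cons _ _ _ _ hm, len13.2]
        simp [entryA, entryB]
      · have hnm : noMarkerB line = true := by simp [noMarkerB, markerB_none line hbull hbear]
        rw [loopA, if_neg hbull, if_neg hbear, List.dropWhile_cons, hnm]
        simp only [if_true]
        exact ih _

-- ===== VERDICT (by name: the statement is the Claim_ definition above) =====
theorem split_speakers_spec : Claim_equal_split_speakers := by
  intro history _
  show split_speakers history = split_speakers_alt history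
  rw [split_speakers, split_speakers_alt, loopA_none]
  rfl
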